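-- pv_equiv track=rewrite | github.com/JonasVanhulst/AdventOfCode | 2015/day11/day_11.py | has_two_non_overlapping_pairs
-- ===== SOURCE A (Python) =====
-- def has_two_non_overlapping_pairs(pw: str) -> bool:
--     pairs = set()
--     i = 0
--     while i < len(pw) - 1:
--         if pw[i] == pw[i+1]:
--             pairs.add(pw[i])
--             i += 2  # overslaan zodat paren niet overlappen
--         else:
--             i += 1
--     return len(pairs) >= 2
-- ===== SOURCE B (Python) =====
-- def has_two_non_overlapping_pairs(pw: str) -> bool:
--     # Run-length scan: a character contributes iff it has a maximal run of length >= 2.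
--     distinct = set()
--     i, n = 0, len(pw)
--     while i < n:
--         j = i + 1
--         while j < n and pw[j] == pw[i]:
--             j += 1
--         if j - i >= 2:
--             distinct.add(pw[i])
--         i = j
--     return len(distinct) >= 2
-- ===== Notes on version B (the rewrite author's own statement) =====
-- stated objective: alternative
-- what changed: Replaced the greedy skip-by-2 pointer walk over adjacent positions by a run-length scan that jumps over each maximal run of equal characters and records the run's character when the run has length >= 2.
import Mathlib
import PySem

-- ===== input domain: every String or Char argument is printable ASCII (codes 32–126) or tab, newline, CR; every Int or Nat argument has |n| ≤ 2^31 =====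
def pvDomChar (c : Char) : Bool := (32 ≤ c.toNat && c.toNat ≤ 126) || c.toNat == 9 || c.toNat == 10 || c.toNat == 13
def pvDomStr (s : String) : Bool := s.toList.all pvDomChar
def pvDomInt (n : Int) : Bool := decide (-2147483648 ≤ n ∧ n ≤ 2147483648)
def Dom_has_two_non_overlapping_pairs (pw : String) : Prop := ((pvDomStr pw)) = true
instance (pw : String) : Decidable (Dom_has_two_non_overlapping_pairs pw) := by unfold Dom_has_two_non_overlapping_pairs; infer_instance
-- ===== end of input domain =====

-- B replaces A's greedy skip-by-2 pointer walk by a maximal-run scan; alternative decomposition, same cost.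

-- ===== PORT A =====
-- A's while loop over index i: looking at pw[i], pw[i+1]; 'i += 2' drops two chars, 'i += 1' drops one.
def pvLoopA (l : List Char) (pairs : PySem.Set Char) : PySem.Set Char :=
  match l with
  | c1 :: c2 :: rest =>
      if c1 = c2 then pvLoopA rest (PySem.Set.add pairs c1)
      else pvLoopA (c2 :: rest) pairs
  | [_] => pairs
  | [] => pairs

def has_two_non_overlapping_pairs (pw : String) : Bool :=
  decide (2 ≤ (pvLoopA pw.toList PySem.Set.empty).length)

-- ===== PORT B =====
-- B's outer while loop: each step consumes one maximal run (head char c, then the chars equal to c).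
def pvLoopB (l : List Char) (s : PySem.Set Char) : PySem.Set Char :=
  match l with
  | [] => s
  | c :: t =>
      pvLoopB (t.dropWhile (· == c))
        (if 2 ≤ (t.takeWhile (· == c)).length + 1 then PySem.Set.add s c else s)
termination_by l.length
decreasing_by
  simp only [List.length_cons]
  exact Nat.lt_succ_of_le (List.length_dropWhile_le _ _)

def has_two_non_overlapping_pairs_alt (pw : String) : Bool :=
  decide (2 ≤ (pvLoopB pw.toList PySem.Set.empty).length)

-- ===== PRECONDITION & SPEC =====
def Spec_has_two_non_overlapping_pairs (pw : String) (out : Bool) : Prop := out = has_two_non_overlapping_pairs_alt pw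
instance (pw : String) (out : Bool) : Decidable (Spec_has_two_non_overlapping_pairs pw out) := by unfold Spec_has_two_non_overlapping_pairs; infer_instance

-- ===== CLAIM (what is proved, stated in full; the proofs are below) =====
def Claim_equal_has_two_non_overlapping_pairs : Prop := ∀ (pw : String), Dom_has_two_non_overlapping_pairs pw → Spec_has_two_non_overlapping_pairs pw (has_two_non_overlapping_pairs pw)

-- ===== LEMMAS AND PROOFS =====

-- "c has some adjacent equal pair in l"
def pvHasPair : List Char → Char → Bool
  | a :: b :: t, c => (a == b && a == c) || pvHasPair (b :: t) c
  | [_], _ => false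
  | [], _ => false

lemma pvHasPair_absorb (a : Char) (t : List Char) (x : Char) :
    ((x == a) || pvHasPair (a :: t) x) = ((x == a) || pvHasPair t x) := by
  cases t with
  | nil => simp [pvHasPair]
  | cons b t' =>
    by_cases hx : x = a
    · simp [pvHasPair, hx]
    · have h1 : (a == x) = false := by
        simp only [beq_eq_false_iff_ne, ne_eq]
        exact fun h => hx h.symm
      simp [pvHasPair, h1]

lemma pvHasPair_cons_same (a : Char) (t : List Char) (x : Char) :
    pvHasPair (a :: a :: t) x = ((x == a) || pvHasPair t x) := by
  by_cases hx : x = a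
  · simp [pvHasPair, hx]
  · have h1 : (a == x) = false := by
      simp only [beq_eq_false_iff_ne, ne_eq]
      exact fun h => hx h.symm
    have h0 : (x == a) = false := by simp [beq_eq_false_iff_ne, hx]
    have habs := pvHasPair_absorb a t x
    rw [h0] at habs
    simp only [Bool.false_or] at habs
    simp [pvHasPair, h0, h1, habs]

lemma pvHasPair_run (t : List Char) (c x : Char) :
    pvHasPair (c :: t) x =
      ((x == c && !(t.takeWhile (· == c)).isEmpty) || pvHasPair (t.dropWhile (· == c)) x) := by
  induction t with
  | nil => simp [pvHasPair]
  | cons b t' ih =>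
    by_cases hb : b = c
    · subst hb
      rw [pvHasPair_cons_same]
      by_cases hx : x = b
      · simp [hx]
      · have h0 : (x == b) = false := by simp [beq_eq_false_iff_ne, hx]
        have habs := pvHasPair_absorb b t' x
        rw [h0] at habs
        simp only [Bool.false_or] at habs
        rw [ih] at habs
        simp only [h0, Bool.false_and, Bool.false_or] at habs
        simp [h0, habs]
    · have h2 : (b == c) = false := by simp [beq_eq_false_iff_ne, hb]
      have h3 : (c == b) = false := by
        simp only [beq_eq_false_iff_ne, ne_eq]
        exact fun h => hb h.symm
      simp [pvHasPair, h2, h3]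

lemma mem_pvLoopA (l : List Char) (s : PySem.Set Char) (x : Char) :
    x ∈ pvLoopA l s ↔ x ∈ s ∨ pvHasPair l x = true := by
  induction l, s using pvLoopA.induct with
  | case1 pairs c2 rest ih =>
    rw [show pvLoopA (c2 :: c2 :: rest) pairs = pvLoopA rest (PySem.Set.add pairs c2) from by
      simp [pvLoopA]]
    rw [ih, PySem.Set.mem_add, pvHasPair_cons_same]
    simp only [Bool.or_eq_true, beq_iff_eq]
    tauto
  | case2 pairs c1 c2 rest h ih =>
    rw [show pvLoopA (c1 :: c2 :: rest) pairs = pvLoopA (c2 :: rest) pairs from by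
      simp [pvLoopA, h]]
    rw [ih]
    have h2 : (c1 == c2) = false := by simp [beq_eq_false_iff_ne, h]
    simp [pvHasPair, h2]
  | case3 pairs c => simp [pvLoopA, pvHasPair]
  | case4 pairs => simp [pvLoopA, pvHasPair]

lemma mem_pvLoopB (l : List Char) (s : PySem.Set Char) (x : Char) :
    x ∈ pvLoopB l s ↔ x ∈ s ∨ pvHasPair l x = true := by
  induction l, s using pvLoopB.induct with
  | case1 s => simp [pvLoopB, pvHasPair]
  | case2 s c t ih =>
    simp only [dite_eq_ite] at ih
    rw [pvLoopB, ih, pvHasPair_run]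
    by_cases hrun : (t.takeWhile (· == c)).isEmpty
    · have hlen : ¬ 2 ≤ (t.takeWhile (· == c)).length + 1 := by
        rw [List.isEmpty_iff] at hrun
        simp [hrun]
      rw [if_neg hlen]
      simp [hrun]
    · have hlen : 2 ≤ (t.takeWhile (· == c)).length + 1 := by
        rcases List.isEmpty_eq_false_iff_exists_mem.mp (Bool.eq_false_iff.mpr hrun)
          with ⟨y, hy⟩
        have := List.length_pos_of_mem hy
        omega
      rw [if_pos hlen, PySem.Set.mem_add]
      have hrun' : (t.takeWhile (· == c)).isEmpty = false := Bool.eq_false_iff.mpr hrun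
      by_cases hx : x = c
      · simp [hx, hrun']
      · have h1 : (x == c) = false := by simp [beq_eq_false_iff_ne, hx]
        simp [hx, h1]

lemma nodup_pvLoopA (l : List Char) (s : PySem.Set Char) (hs : s.Nodup) :
    (pvLoopA l s).Nodup := by
  induction l, s using pvLoopA.induct with
  | case1 pairs c2 rest ih =>
    rw [show pvLoopA (c2 :: c2 :: rest) pairs = pvLoopA rest (PySem.Set.add pairs c2) from by
      simp [pvLoopA]]
    exact ih (PySem.Set.nodup_add _ _ hs)
  | case2 pairs c1 c2 rest h ih =>
    rw [show pvLoopA (c1 :: c2 :: rest) pairs = pvLoopA (c2 :: rest) pairs from by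
      simp [pvLoopA, h]]
    exact ih hs
  | case3 pairs c => simpa [pvLoopA] using hs
  | case4 pairs => simpa [pvLoopA] using hs

lemma nodup_pvLoopB (l : List Char) (s : PySem.Set Char) (hs : s.Nodup) :
    (pvLoopB l s).Nodup := by
  induction l, s using pvLoopB.induct with
  | case1 s => simpa [pvLoopB] using hs
  | case2 s c t ih =>
    simp only [dite_eq_ite] at ih
    rw [pvLoopB]
    apply ih
    split
    · exact PySem.Set.nodup_add _ _ hs
    · exact hs

lemma loopA_perm_loopB (l : List Char) :
    (pvLoopA l PySem.Set.empty).Perm (pvLoopB l PySem.Set.empty) := by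
  have h1 : (pvLoopA l PySem.Set.empty).Nodup :=
    nodup_pvLoopA l PySem.Set.empty (by simp [PySem.Set.empty])
  have h2 : (pvLoopB l PySem.Set.empty).Nodup :=
    nodup_pvLoopB l PySem.Set.empty (by simp [PySem.Set.empty])
  refine (List.perm_ext_iff_of_nodup h1 h2).mpr ?_
  intro x
  rw [mem_pvLoopA, mem_pvLoopB]

-- ===== VERDICT (by name: the statement is the Claim_ definition above) =====
theorem has_two_non_overlapping_pairs_spec : Claim_equal_has_two_non_overlapping_pairs := by
  intro pw _
  unfold Spec_has_two_non_overlapping_pairs has_two_non_overlapping_pairs has_two_non_overlapping_pairs_alt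
  rw [(loopA_perm_loopB pw.toList).length_eq]
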